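-- pv_equiv track=rewrite | github.com/tjlincoln/meetEase | test.py | analyze_agenda_resolution
-- ===== SOURCE A (Python) =====
-- from typing import List, Tuple, Optional, Dict
--
-- def analyze_agenda_resolution(agenda_points: List[str], transcript: str) -> Tuple[List[str], List[str]]:
--     t = (transcript or "").lower()
--     resolved_kw = ["resolved", "completed", "closed", "fixed", "agreed"]
--     unresolved_kw = ["unresolved", "pending", "needs further discussion", "open", "incomplete"]
--     resolved, unresolved = [], []
--     for p in agenda_points:
--         pl = p.lower()
--         if pl in t:
--             idx = t.find(pl)
--             window = t[max(0, idx-200): idx+200]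
--             if any(k in window for k in resolved_kw): resolved.append(p)
--             elif any(k in window for k in unresolved_kw): unresolved.append(p)
--             else: unresolved.append(p)
--         else: unresolved.append(p)
--     return resolved, unresolved
-- ===== SOURCE B (Python) =====
-- RESOLVED_KW = ["resolved", "completed", "closed", "fixed", "agreed"]
--
-- def analyze_agenda_resolution(agenda_points, transcript):
--     t = (transcript or "").lower()
--     # Build once: every occurrence (start, end) of any resolved keyword in t.
--     occs = [(j, j + len(k))
--             for k in RESOLVED_KW
--             for j in range(len(t))
--             if t[j:j + len(k)] == k]
--     def is_resolved(p):
--         pl = p.lower()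
--         idx = t.find(pl)
--         return idx >= 0 and any(max(0, idx - 200) <= s and e <= idx + 200
--                                 for (s, e) in occs)
--     resolved = [p for p in agenda_points if is_resolved(p)]
--     unresolved = [p for p in agenda_points if not is_resolved(p)]
--     return resolved, unresolved
-- ===== Notes on version B (the rewrite author's own statement) =====
-- stated objective: alternative
-- what changed: B precomputes one index of all resolved-keyword occurrence intervals in the transcript and classifies each agenda point by a range check on its first-occurrence window (partitioning via two comprehensions), instead of A's per-point window slicing with substring scans over two keyword lists.
import Mathlib
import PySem

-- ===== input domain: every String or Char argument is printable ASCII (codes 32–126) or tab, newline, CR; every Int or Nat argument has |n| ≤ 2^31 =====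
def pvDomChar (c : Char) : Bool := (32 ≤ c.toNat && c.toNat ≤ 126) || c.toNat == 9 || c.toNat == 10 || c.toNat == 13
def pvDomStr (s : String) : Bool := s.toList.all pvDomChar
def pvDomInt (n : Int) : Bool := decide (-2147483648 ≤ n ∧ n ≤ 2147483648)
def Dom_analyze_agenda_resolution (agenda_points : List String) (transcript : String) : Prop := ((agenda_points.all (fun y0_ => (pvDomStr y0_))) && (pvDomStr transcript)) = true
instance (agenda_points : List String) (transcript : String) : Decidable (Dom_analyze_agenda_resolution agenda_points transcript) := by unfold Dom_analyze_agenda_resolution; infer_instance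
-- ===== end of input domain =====

-- B replaces A's per-point window slicing + keyword substring scans by one precomputed
-- index of resolved-keyword occurrence intervals plus a range check (objective: alternative).

-- ===== PORT A =====
def pvResolvedKw : List String := ["resolved", "completed", "closed", "fixed", "agreed"]
def pvUnresolvedKw : List String := ["unresolved", "pending", "needs further discussion", "open", "incomplete"]

def analyze_agenda_resolution (agenda_points : List String) (transcript : String) : List String × List String :=
  let t := PySem.Str.lower (if transcript = "" then "" else transcript)  -- (transcript or "").lower()
  agenda_points.foldl (fun st p =>
    let pl := PySem.Str.lower p
    if PySem.Str.isIn pl t then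
      let idx := PySem.Str.find t pl
      let window := PySem.Str.slice t (some (max 0 (idx - 200))) (some (idx + 200))
      if pvResolvedKw.any (fun k => PySem.Str.isIn k window) then (st.1 ++ [p], st.2)
      else if pvUnresolvedKw.any (fun k => PySem.Str.isIn k window) then (st.1, st.2 ++ [p])
      else (st.1, st.2 ++ [p])
    else (st.1, st.2 ++ [p])) ([], [])

-- ===== PORT B =====
-- occurrence index of Source B: every (start, end) of a resolved keyword in t
def pvOccs (t : String) : List (Nat × Nat) :=
  pvResolvedKw.flatMap (fun k =>
    (((List.range t.toList.length).filter (fun (j : Nat) =>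
        decide (PySem.Str.slice t (some (j : Int)) (some ((j : Int) + PySem.Str.len k)) = k))).map
      (fun (j : Nat) => (j, j + k.toList.length))))

def pvIsResolved (t : String) (p : String) : Bool :=
  let pl := PySem.Str.lower p
  let idx := PySem.Str.find t pl
  decide (0 ≤ idx) &&
    (pvOccs t).any (fun se =>
      decide (max 0 (idx - 200) ≤ (se.1 : Int)) && decide ((se.2 : Int) ≤ idx + 200))

def analyze_agenda_resolution_alt (agenda_points : List String) (transcript : String) : List String × List String :=
  let t := PySem.Str.lower (if transcript = "" then "" else transcript)  -- (transcript or "").lower()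
  (agenda_points.filter (fun p => pvIsResolved t p),
   agenda_points.filter (fun p => !pvIsResolved t p))

-- ===== PRECONDITION & SPEC =====
def Spec_analyze_agenda_resolution (agenda_points : List String) (transcript : String) (out : List String × List String) : Prop := out = analyze_agenda_resolution_alt agenda_points transcript
instance (agenda_points : List String) (transcript : String) (out : List String × List String) : Decidable (Spec_analyze_agenda_resolution agenda_points transcript out) := by unfold Spec_analyze_agenda_resolution; infer_instance

-- ===== CLAIM (what is proved, stated in full; the proofs are below) =====
def Claim_equal_analyze_agenda_resolution : Prop := ∀ (agenda_points : List String) (transcript : String), Dom_analyze_agenda_resolution agenda_points transcript → Spec_analyze_agenda_resolution agenda_points transcript (analyze_agenda_resolution agenda_points transcript)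

-- ===== LEMMAS AND PROOFS =====

-- A's per-point condition, as a predicate
def pvCondA (t : String) (p : String) : Bool :=
  let pl := PySem.Str.lower p
  PySem.Str.isIn pl t &&
    pvResolvedKw.any (fun k =>
      PySem.Str.isIn k (PySem.Str.slice t (some (max 0 (PySem.Str.find t pl - 200)))
        (some (PySem.Str.find t pl + 200))))

-- A's loop step collapses to "append to .1 iff pvCondA, else to .2"
lemma stepA_eq (t : String) (p : String) (st : List String × List String) :
    (let pl := PySem.Str.lower p
     if PySem.Str.isIn pl t then
       let idx := PySem.Str.find t pl
       let window := PySem.Str.slice t (some (max 0 (idx - 200))) (some (idx + 200))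
       if pvResolvedKw.any (fun k => PySem.Str.isIn k window) then (st.1 ++ [p], st.2)
       else if pvUnresolvedKw.any (fun k => PySem.Str.isIn k window) then (st.1, st.2 ++ [p])
       else (st.1, st.2 ++ [p])
     else (st.1, st.2 ++ [p])) =
    (if pvCondA t p then (st.1 ++ [p], st.2) else (st.1, st.2 ++ [p])) := by
  cases h1 : PySem.Str.isIn (PySem.Str.lower p) t with
  | false => simp only [pvCondA, h1, Bool.false_and, Bool.false_eq_true, if_false]
  | true =>
    cases h2 : (pvResolvedKw.any fun k =>
        PySem.Str.isIn k (PySem.Str.slice t (some (max 0 (PySem.Str.find t (PySem.Str.lower p) - 200)))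
          (some (PySem.Str.find t (PySem.Str.lower p) + 200)))) with
    | false =>
      simp only [pvCondA, h1, h2, Bool.true_and, Bool.false_eq_true, if_false, ite_self]
    | true =>
      simp only [pvCondA, h1, h2, Bool.true_and, if_true]

-- the accumulator fold is a partition
lemma foldl_partition (c : String → Bool) (l : List String) (r u : List String) :
    l.foldl (fun st p => if c p then (st.1 ++ [p], st.2) else (st.1, st.2 ++ [p])) (r, u) =
      (r ++ l.filter c, u ++ l.filter (fun p => !c p)) := by
  induction l generalizing r u with
  | nil => simp
  | cons a l ih =>
    by_cases h : c a <;> simp [h, ih]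

-- substring of a drop/take window ⟺ an absolute occurrence inside the bounds
lemma infix_window_iff (kw tl : List Char) (hk : kw ≠ []) (L m : Nat) :
    (kw <:+: (tl.drop L).take m) ↔
      ∃ j, kw <+: tl.drop j ∧ L ≤ j ∧ j + kw.length ≤ L + m := by
  have hlen : 1 ≤ kw.length := by
    cases kw with
    | nil => exact absurd rfl hk
    | cons a l => simp
  rw [← PySem.Chars.isIn_iff_infix, ← PySem.Chars.exists_prefix_drop_iff_isIn]
  constructor
  · rintro ⟨j, hj⟩
    rw [List.drop_take, List.drop_drop] at hj
    rw [List.prefix_take_iff] at hj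
    exact ⟨j + L, by rw [Nat.add_comm]; exact hj.1, by omega, by omega⟩
  · rintro ⟨j, hj, hLj, hjm⟩
    refine ⟨j - L, ?_⟩
    rw [List.drop_take, List.drop_drop, List.prefix_take_iff, Nat.add_sub_cancel' hLj]
    exact ⟨hj, by omega⟩

-- slice-equality test of Source B's index ⟺ prefix at the absolute position
lemma sliceEq_iff (t : String) (k : String) (j : Nat) :
    (PySem.Str.slice t (some (j : Int)) (some ((j : Int) + PySem.Str.len k)) = k) ↔
      k.toList <+: t.toList.drop j := by
  rw [PySem.Str.len_eq, ← Int.natCast_add, ← String.toList_inj, PySem.Str.toList_slice]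
  show PySem.Chars.slice t.toList _ _ = k.toList ↔ _
  rw [PySem.Chars.slice, PySem.List.slice_natCast, Nat.add_sub_cancel_left]
  rw [List.prefix_iff_eq_take]
  exact eq_comm

-- per keyword: "k in window" ⟺ some entry of Source B's occurrence index is inside the bounds
lemma keyword_window_iff (t k : String) (hk : k.toList ≠ []) (i : Nat) :
    (PySem.Str.isIn k (PySem.Str.slice t (some (max 0 ((i : Int) - 200))) (some ((i : Int) + 200))) = true) ↔
      ∃ j, j < t.toList.length ∧
        (PySem.Str.slice t (some (j : Int)) (some ((j : Int) + PySem.Str.len k)) = k) ∧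
        (max 0 ((i : Int) - 200) ≤ (j : Int) ∧ ((j + k.toList.length : Nat) : Int) ≤ (i : Int) + 200) := by
  have hL : (max 0 ((i : Int) - 200)) = ((i - 200 : Nat) : Int) := by omega
  have hH : ((i : Int) + 200) = (((i + 200 : Nat)) : Int) := by omega
  rw [hL, hH, PySem.Str.isIn_iff_infix, PySem.Str.toList_slice]
  show k.toList <:+: PySem.List.slice t.toList _ _ ↔ _
  rw [PySem.List.slice_natCast]
  rw [infix_window_iff k.toList t.toList hk (i - 200) ((i + 200) - (i - 200))]
  have hlen : 1 ≤ k.toList.length := by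
    cases h : k.toList with
    | nil => exact absurd h hk
    | cons a l => simp
  constructor
  · rintro ⟨j, hj, h1, h2⟩
    have hjlt : j < t.toList.length := by
      have := hj.length_le
      rw [List.length_drop] at this
      omega
    exact ⟨j, hjlt, (sliceEq_iff t k j).mpr hj, by omega, by omega⟩
  · rintro ⟨j, hjlt, hsl, h1, h2⟩
    exact ⟨j, (sliceEq_iff t k j).mp hsl, by omega, by omega⟩

-- the two per-point conditions agree
lemma cond_eq (t p : String) : pvCondA t p = pvIsResolved t p := by
  simp only [pvCondA, pvIsResolved]
  set pl := PySem.Str.lower p with hpl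
  by_cases hin : PySem.Str.isIn pl t = true
  · have hfind : 0 ≤ PySem.Str.find t pl := by
      rw [PySem.Str.find_nonneg_iff]
      rw [PySem.Str.isIn_iff_infix] at hin
      exact hin
    obtain ⟨i, hi⟩ : ∃ i : Nat, PySem.Str.find t pl = (i : Int) :=
      ⟨(PySem.Str.find t pl).toNat, (Int.toNat_of_nonneg hfind).symm⟩
    simp only [hin, hi, Bool.true_and, Int.natCast_nonneg, decide_true]
    -- both sides are an `any`; compare in Prop
    apply Bool.coe_iff_coe.mp
    rw [List.any_eq_true, pvOccs, List.any_flatMap, List.any_eq_true]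
    constructor
    · rintro ⟨k, hkmem, hkwin⟩
      have hk : k.toList ≠ [] := by
        fin_cases hkmem <;> simp
      obtain ⟨j, hjlt, hsl, hb1, hb2⟩ := (keyword_window_iff t k hk i).mp hkwin
      refine ⟨k, hkmem, ?_⟩
      rw [List.any_eq_true]
      refine ⟨(j, j + k.toList.length), ?_, ?_⟩
      · simp only [List.mem_map, List.mem_filter, List.mem_range]
        exact ⟨j, ⟨hjlt, by simpa using hsl⟩, rfl⟩
      · simp only [Bool.and_eq_true, decide_eq_true_eq]
        exact ⟨hb1, by exact_mod_cast hb2⟩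
    · rintro ⟨k, hkmem, hany⟩
      rw [List.any_eq_true] at hany
      obtain ⟨se, hse, hbnd⟩ := hany
      simp only [List.mem_map, List.mem_filter, List.mem_range] at hse
      obtain ⟨j, ⟨hjlt, hsl⟩, rfl⟩ := hse
      simp only [Bool.and_eq_true, decide_eq_true_eq] at hbnd
      have hk : k.toList ≠ [] := by
        fin_cases hkmem <;> simp
      refine ⟨k, hkmem, (keyword_window_iff t k hk i).mpr ?_⟩
      exact ⟨j, hjlt, by simpa using hsl, hbnd.1, by exact_mod_cast hbnd.2⟩
  · -- point not in transcript: find is negative, both sides false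
    have hfalse : PySem.Str.isIn pl t = false := by
      cases h : PySem.Str.isIn pl t
      · rfl
      · exact absurd h hin
    have hneg : ¬ (0 ≤ PySem.Str.find t pl) := by
      rw [PySem.Str.find_nonneg_iff]
      intro h
      exact hin (by rw [PySem.Str.isIn_iff_infix]; exact h)
    simp only [hfalse, decide_eq_false hneg, Bool.false_and]

-- ===== VERDICT (by name: the statement is the Claim_ definition above) =====
theorem analyze_agenda_resolution_spec : Claim_equal_analyze_agenda_resolution := by
  intro agenda_points transcript _
  show _ = _
  unfold analyze_agenda_resolution analyze_agenda_resolution_alt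
  simp only []
  set t := PySem.Str.lower (if transcript = "" then "" else transcript) with ht
  have hstep : ∀ (st : List String × List String) (p : String),
      (let pl := PySem.Str.lower p
       if PySem.Str.isIn pl t then
         let idx := PySem.Str.find t pl
         let window := PySem.Str.slice t (some (max 0 (idx - 200))) (some (idx + 200))
         if pvResolvedKw.any (fun k => PySem.Str.isIn k window) then (st.1 ++ [p], st.2)
         else if pvUnresolvedKw.any (fun k => PySem.Str.isIn k window) then (st.1, st.2 ++ [p])
         else (st.1, st.2 ++ [p])
       else (st.1, st.2 ++ [p])) =
      (if pvIsResolved t p then (st.1 ++ [p], st.2) else (st.1, st.2 ++ [p])) := by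
    intro st p
    rw [stepA_eq t p st, cond_eq t p]
  calc agenda_points.foldl _ ([], [])
      = agenda_points.foldl
          (fun st p => if pvIsResolved t p then (st.1 ++ [p], st.2) else (st.1, st.2 ++ [p]))
          (([] : List String), ([] : List String)) := by
        apply PySem.List.foldl_congr_mem
        intro st p _
        exact hstep st p
    _ = _ := by
        rw [foldl_partition (fun p => pvIsResolved t p) agenda_points [] []]
        simp
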